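-- pv_equiv track=rewrite | github.com/ciano123/topicos-especiais-comp-II | Trabalho-esquenta-02/module/maiorValor2.py | maiorValor2
-- ===== SOURCE A (Python) =====
-- def maiorValor2(vetor, valor_inicial, valor_final):
--     if (valor_final - valor_inicial <= 1):
--         return max(vetor[valor_inicial], vetor[valor_final])
--     else:
--         media = int((valor_inicial + valor_final)/2)
--         var1 = maiorValor2(vetor, valor_inicial, media)
--         var2 = maiorValor2(vetor, media+1, valor_final)
--
--         return max(var1, var2)
-- ===== SOURCE B (Python) =====
-- def maiorValor2(vetor, valor_inicial, valor_final):
--     resultado = max(vetor[valor_inicial], vetor[valor_final])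
--     for i in range(valor_inicial + 1, valor_final):
--         resultado = max(resultado, vetor[i])
--     return resultado
-- ===== Notes on version B (the rewrite author's own statement) =====
-- stated objective: simpler
-- what changed: Replaced the divide-and-conquer recursion with a single iterative pass that seeds the result with both endpoint elements and scans the strict interior of the range.
import Mathlib
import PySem

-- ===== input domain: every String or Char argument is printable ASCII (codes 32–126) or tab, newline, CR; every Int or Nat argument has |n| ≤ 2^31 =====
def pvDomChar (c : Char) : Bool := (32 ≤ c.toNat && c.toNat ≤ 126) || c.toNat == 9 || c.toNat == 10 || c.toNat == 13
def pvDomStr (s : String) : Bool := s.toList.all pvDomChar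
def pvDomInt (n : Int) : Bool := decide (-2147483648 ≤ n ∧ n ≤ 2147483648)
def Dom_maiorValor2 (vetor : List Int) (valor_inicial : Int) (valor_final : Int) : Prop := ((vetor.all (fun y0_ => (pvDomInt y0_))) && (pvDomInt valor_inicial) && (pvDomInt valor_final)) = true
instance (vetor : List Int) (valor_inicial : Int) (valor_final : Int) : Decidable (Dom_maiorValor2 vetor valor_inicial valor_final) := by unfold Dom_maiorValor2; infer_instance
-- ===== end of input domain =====

-- B replaces A's divide-and-conquer recursion with a single iterative pass (simpler decomposition, same result).

-- Bounds for Python's int((a+b)/2): exact truncating division (sums here are far below 2^53, so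
-- the float division is exact); cited by the port's decreasing_by.
theorem pvTdiv2_bounds (a b : Int) (h : 2 ≤ b - a) :
    a ≤ (a + b).tdiv 2 ∧ (a + b).tdiv 2 < b := by
  by_cases hs : 0 ≤ a + b
  · rw [Int.tdiv_eq_ediv_of_nonneg hs]; omega
  · have hs' : a + b < 0 := by omega
    have h2 : (-(a + b)).tdiv 2 = (-(a + b)) / 2 := Int.tdiv_eq_ediv_of_nonneg (by omega)
    have h3 := Int.neg_tdiv (a + b) 2
    omega

-- ===== PORT A =====
-- int((valor_inicial+valor_final)/2) = truncating division: |sum| ≤ 2^32 < 2^53 so the float quotient is exact, and int() truncates toward zero = Int.tdiv.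
def maiorValor2 (vetor : List Int) (valor_inicial : Int) (valor_final : Int) : Int :=
  if valor_final - valor_inicial ≤ 1 then
    max (PySem.List.pyGetD vetor valor_inicial 0) (PySem.List.pyGetD vetor valor_final 0)
  else
    let media := (valor_inicial + valor_final).tdiv 2
    let var1 := maiorValor2 vetor valor_inicial media
    let var2 := maiorValor2 vetor (media + 1) valor_final
    max var1 var2
termination_by (valor_final - valor_inicial).toNat
decreasing_by
  · have := pvTdiv2_bounds valor_inicial valor_final (by omega)
    omega
  · have := pvTdiv2_bounds valor_inicial valor_final (by omega)
    omega

-- ===== PORT B =====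
def maiorValor2_alt (vetor : List Int) (valor_inicial : Int) (valor_final : Int) : Int :=
  (PySem.List.pyRange (valor_inicial + 1) valor_final 1).foldl
    (fun resultado i => max resultado (PySem.List.pyGetD vetor i 0))
    (max (PySem.List.pyGetD vetor valor_inicial 0) (PySem.List.pyGetD vetor valor_final 0))

-- ===== PRECONDITION & SPEC =====
-- Pre_: both index arguments are valid Python indices into vetor (negative = from the end);
-- outside this A raises IndexError on some vetor[i].
def Pre_maiorValor2 (vetor : List Int) (valor_inicial : Int) (valor_final : Int) : Prop :=
  PySem.Raise.InRange vetor.length valor_inicial ∧ PySem.Raise.InRange vetor.length valor_final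
instance (vetor : List Int) (valor_inicial : Int) (valor_final : Int) : Decidable (Pre_maiorValor2 vetor valor_inicial valor_final) := by unfold Pre_maiorValor2; infer_instance

def pvWitness_maiorValor2 : List Int × Int × Int := ([3, 7, -2, 5], 0, 3)

def Spec_maiorValor2 (vetor : List Int) (valor_inicial : Int) (valor_final : Int) (out : Int) : Prop := out = maiorValor2_alt vetor valor_inicial valor_final
instance (vetor : List Int) (valor_inicial : Int) (valor_final : Int) (out : Int) : Decidable (Spec_maiorValor2 vetor valor_inicial valor_final out) := by unfold Spec_maiorValor2; infer_instance

-- ===== CLAIM (what is proved, stated in full; the proofs are below) =====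
def Claim_equal_maiorValor2 : Prop := ∀ (vetor : List Int) (valor_inicial : Int) (valor_final : Int), Dom_maiorValor2 vetor valor_inicial valor_final → Pre_maiorValor2 vetor valor_inicial valor_final → Spec_maiorValor2 vetor valor_inicial valor_final (maiorValor2 vetor valor_inicial valor_final)

-- ===== LEMMAS AND PROOFS =====

-- Inclusive max over indices vi..vf (vi ≤ vf), the common characterisation of both ports.
def pvMaxRange (vetor : List Int) (vi vf : Int) : Int :=
  (PySem.List.pyRange (vi + 1) (vf + 1) 1).foldl
    (fun r i => max r (PySem.List.pyGetD vetor i 0))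
    (PySem.List.pyGetD vetor vi 0)

theorem pvFoldMaxSeed (g : Int → Int) (l : List Int) (s b : Int) :
    l.foldl (fun r i => max r (g i)) (max s b)
      = max (l.foldl (fun r i => max r (g i)) s) b := by
  induction l generalizing s with
  | nil => rfl
  | cons x xs ih =>
    simp only [List.foldl_cons]
    rw [max_right_comm, ih]

theorem pvAlt_eq_maxRange (vetor : List Int) (vi vf : Int) (h : vi ≤ vf) :
    maiorValor2_alt vetor vi vf = pvMaxRange vetor vi vf := by
  rcases eq_or_lt_of_le h with rfl | hlt
  · unfold maiorValor2_alt pvMaxRange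
    rw [PySem.List.pyRange_one_eq_nil (by omega)]
    simp
  · unfold maiorValor2_alt pvMaxRange
    rw [pvFoldMaxSeed, PySem.List.pyRange_one_succ_right (by omega : vi + 1 ≤ vf),
      List.foldl_append]
    simp

theorem pvMaxRange_split (vetor : List Int) (vi m vf : Int) (h1 : vi ≤ m) (h2 : m < vf) :
    pvMaxRange vetor vi vf = max (pvMaxRange vetor vi m) (pvMaxRange vetor (m + 1) vf) := by
  unfold pvMaxRange
  rw [PySem.List.pyRange_one_append (vi + 1) (m + 1) (vf + 1) (by omega) (by omega),
    List.foldl_append,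
    PySem.List.pyRange_one_cons (by omega : m + 1 < vf + 1)]
  simp only [List.foldl_cons]
  rw [max_comm _ (PySem.List.pyGetD vetor (m + 1) 0), pvFoldMaxSeed, max_comm]

theorem pvMain (n : Nat) : ∀ (vetor : List Int) (vi vf : Int), (vf - vi).toNat ≤ n →
    maiorValor2 vetor vi vf = maiorValor2_alt vetor vi vf := by
  induction n with
  | zero =>
    intro vetor vi vf hn
    rw [maiorValor2, if_pos (by omega)]
    unfold maiorValor2_alt
    rw [PySem.List.pyRange_one_eq_nil (by omega)]
    rfl
  | succ n ih =>
    intro vetor vi vf hn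
    by_cases h : vf - vi ≤ 1
    · rw [maiorValor2, if_pos h]
      unfold maiorValor2_alt
      rw [PySem.List.pyRange_one_eq_nil (by omega)]
      rfl
    · rw [maiorValor2, if_neg h]
      have hb := pvTdiv2_bounds vi vf (by omega)
      set m := (vi + vf).tdiv 2 with hm
      show max (maiorValor2 vetor vi m) (maiorValor2 vetor (m + 1) vf) = _
      rw [ih vetor vi m (by omega), ih vetor (m + 1) vf (by omega),
        pvAlt_eq_maxRange vetor vi m (by omega),
        pvAlt_eq_maxRange vetor (m + 1) vf (by omega),
        pvAlt_eq_maxRange vetor vi vf (by omega),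
        pvMaxRange_split vetor vi m vf (by omega) (by omega)]

-- ===== VERDICT (by name: the statement is the Claim_ definition above) =====
theorem maiorValor2_spec : Claim_equal_maiorValor2 := by
  intro vetor vi vf _ _
  exact pvMain (vf - vi).toNat vetor vi vf le_rfl
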